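-- pv_equiv track=rewrite | github.com/moizali123/smartHire_FYP | static/calc.py | count_matching_strings
-- ===== SOURCE A (Python) =====
-- def count_matching_strings(master, slave):
--     count = 0
--     master_lower = [mstr.lower() for mstr in master]
--     slave_lower = [sstr.lower() for sstr in slave]
--
--     for slave_string in slave_lower:
--         if slave_string in master_lower:
--             count += 1
--     return count
-- ===== SOURCE B (Python) =====
-- def count_matching_strings(master, slave):
--     ms = sorted(m.lower() for m in master)
--     n = len(ms)
--     count = 0
--     for s in slave:
--         t = s.lower()
--         lo, hi = 0, n
--         while lo < hi:
--             mid = (lo + hi) // 2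
--             if ms[mid] < t:
--                 lo = mid + 1
--             else:
--                 hi = mid
--         if lo < n and ms[lo] == t:
--             count += 1
--     return count
-- ===== Notes on version B (the rewrite author's own statement) =====
-- stated objective: faster
-- what changed: B sorts the lowercased master list once and locates each lowercased slave string by hand-written binary search (bisect_left with an index-in-range and equality check), replacing A's per-slave linear scan of the lowercased master list.
import Mathlib
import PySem

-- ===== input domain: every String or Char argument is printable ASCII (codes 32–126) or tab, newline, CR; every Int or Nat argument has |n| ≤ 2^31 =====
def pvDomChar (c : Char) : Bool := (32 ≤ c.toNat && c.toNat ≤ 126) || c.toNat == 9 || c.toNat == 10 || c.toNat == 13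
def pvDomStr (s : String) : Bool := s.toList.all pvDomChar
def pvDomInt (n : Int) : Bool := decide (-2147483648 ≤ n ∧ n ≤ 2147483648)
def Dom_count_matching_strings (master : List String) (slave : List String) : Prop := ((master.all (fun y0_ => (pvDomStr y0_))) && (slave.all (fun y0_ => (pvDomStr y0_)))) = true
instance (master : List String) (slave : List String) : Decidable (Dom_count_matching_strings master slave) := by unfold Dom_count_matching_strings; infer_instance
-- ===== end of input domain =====

-- B sorts the lowercased master list once and finds each lowercased slave string by
-- binary search (bisect_left + equality check), instead of A's per-slave linear scan.

-- ===== PORT A =====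
def count_matching_strings (master : List String) (slave : List String) : Int :=
  let master_lower := master.map PySem.Str.lower
  let slave_lower := slave.map PySem.Str.lower
  slave_lower.foldl (fun (count : Int) slave_string =>
    if master_lower.contains slave_string then count + 1 else count) 0

-- ===== PORT B =====
-- the 'while lo < hi' bisect_left loop of Source B, step for step
def pvBisect (ms : List String) (t : String) (lo hi : Nat) : Nat :=
  if _h : lo < hi then
    let mid := (lo + hi) / 2
    if ms.getD mid "" < t then pvBisect ms t (mid + 1) hi
    else pvBisect ms t lo mid
  else lo
termination_by hi - lo
decreasing_by all_goals omega

def count_matching_strings_alt (master : List String) (slave : List String) : Int :=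
  let ms := PySem.List.sorted (master.map PySem.Str.lower) (fun x => x) false
  let n := ms.length
  slave.foldl (fun (count : Int) s =>
    let t := PySem.Str.lower s
    let lo := pvBisect ms t 0 n
    if lo < n ∧ ms.getD lo "" = t then count + 1 else count) 0

-- ===== PRECONDITION & SPEC =====
def Spec_count_matching_strings (master : List String) (slave : List String) (out : Int) : Prop := out = count_matching_strings_alt master slave
instance (master : List String) (slave : List String) (out : Int) : Decidable (Spec_count_matching_strings master slave out) := by unfold Spec_count_matching_strings; infer_instance

-- ===== CLAIM (what is proved, stated in full; the proofs are below) =====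
def Claim_equal_count_matching_strings : Prop := ∀ (master : List String) (slave : List String), Dom_count_matching_strings master slave → Spec_count_matching_strings master slave (count_matching_strings master slave)

-- ===== LEMMAS AND PROOFS =====

-- invariant of the bisect_left loop on a sorted list
theorem pvBisect_spec (ms : List String) (t : String)
    (hp : ms.Pairwise (· ≤ ·)) (lo hi : Nat)
    (hlo : lo ≤ hi) (hhi : hi ≤ ms.length)
    (hL : ∀ j (hj : j < ms.length), j < lo → ms[j] < t)
    (hR : ∀ j (hj : j < ms.length), hi ≤ j → t ≤ ms[j]) :
    lo ≤ pvBisect ms t lo hi ∧ pvBisect ms t lo hi ≤ hi ∧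
    (∀ j (hj : j < ms.length), j < pvBisect ms t lo hi → ms[j] < t) ∧
    (∀ j (hj : j < ms.length), pvBisect ms t lo hi ≤ j → t ≤ ms[j]) := by
  fun_induction pvBisect ms t lo hi with
  | case1 lo hi h mid hlt ih =>
    have hm : mid < ms.length := by omega
    have hget : ms.getD mid "" = ms[mid] := by
      simp [List.getD_eq_getElem?_getD, List.getElem?_eq_getElem hm]
    rw [hget] at hlt
    obtain ⟨a, b, c, d⟩ := ih (by omega) hhi
      (fun j hj hjl => by
        rcases Nat.lt_or_ge j lo with h' | h'
        · exact hL j hj h'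
        · rcases Nat.lt_or_eq_of_le (show j ≤ mid by omega) with h'' | h''
          · exact lt_of_le_of_lt
              ((List.pairwise_iff_getElem.mp hp) j mid hj hm h'') hlt
          · subst h''; exact hlt)
      hR
    exact ⟨by omega, b, c, d⟩
  | case2 lo hi h mid hge ih =>
    have hm : mid < ms.length := by omega
    have hget : ms.getD mid "" = ms[mid] := by
      simp [List.getD_eq_getElem?_getD, List.getElem?_eq_getElem hm]
    rw [hget] at hge
    obtain ⟨a, b, c, d⟩ := ih (by omega) (by omega) hL
      (fun j hj hjr => by
        rcases Nat.lt_or_eq_of_le (show mid ≤ j by omega) with h'' | h''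
        · exact le_trans (not_lt.mp hge)
            ((List.pairwise_iff_getElem.mp hp) mid j hm hj h'')
        · subst h''; exact not_lt.mp hge)
    exact ⟨a, by omega, c, d⟩
  | case3 lo hi h =>
    exact ⟨le_refl _, by omega, fun j hj hjl => hL j hj (by omega),
      fun j hj hjl => hR j hj (by omega)⟩

-- the bisect-and-check test is membership in a sorted list
theorem pvBisect_mem (ms : List String) (t : String) (hp : ms.Pairwise (· ≤ ·)) :
    (pvBisect ms t 0 ms.length < ms.length ∧
      ms.getD (pvBisect ms t 0 ms.length) "" = t) ↔ t ∈ ms := by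
  obtain ⟨-, hle, hlt, hge⟩ := pvBisect_spec ms t hp 0 ms.length
    (Nat.zero_le _) (le_refl _) (by omega) (by omega)
  set i := pvBisect ms t 0 ms.length with hi
  constructor
  · rintro ⟨hin, heq⟩
    rw [List.getD_eq_getElem?_getD, List.getElem?_eq_getElem hin] at heq
    simp at heq
    exact heq ▸ List.getElem_mem hin
  · intro hmem
    obtain ⟨j, hj, hje⟩ := List.getElem_of_mem hmem
    have hij : i ≤ j := by
      by_contra hc
      exact absurd hje (ne_of_lt (hlt j hj (by omega)))
    have hin : i < ms.length := lt_of_le_of_lt hij hj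
    have h1 : t ≤ ms[i] := hge i hin (le_refl _)
    have h2 : ms[i] ≤ t := by
      rcases Nat.lt_or_eq_of_le hij with h' | h'
      · exact hje ▸ (List.pairwise_iff_getElem.mp hp) i j hin hj h'
      · subst h'; exact le_of_eq hje
    refine ⟨hin, ?_⟩
    rw [List.getD_eq_getElem?_getD, List.getElem?_eq_getElem hin]
    simpa using le_antisymm h2 h1

-- ===== VERDICT (by name: the statement is the Claim_ definition above) =====
theorem count_matching_strings_spec : Claim_equal_count_matching_strings := by
  intro master slave _
  unfold Spec_count_matching_strings count_matching_strings count_matching_strings_alt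
  simp only []
  set ml := master.map PySem.Str.lower with hml
  set ms := PySem.List.sorted ml (fun x => x) false with hms
  have hp : ms.Pairwise (· ≤ ·) := PySem.List.sorted_pairwise ml (fun x => x)
  have hcond : ∀ s : String,
      (ml.contains (PySem.Str.lower s) = true) ↔
      (pvBisect ms (PySem.Str.lower s) 0 ms.length < ms.length ∧
        ms.getD (pvBisect ms (PySem.Str.lower s) 0 ms.length) "" = PySem.Str.lower s) := by
    intro s
    rw [pvBisect_mem ms (PySem.Str.lower s) hp, hms, PySem.List.mem_sorted]
    exact List.contains_iff_mem
  rw [List.foldl_map]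
  congr 1
  funext c s
  by_cases h : ml.contains (PySem.Str.lower s) = true
  · simp only [h, if_true, if_pos ((hcond s).mp h)]
  · have hn : ¬ (pvBisect ms (PySem.Str.lower s) 0 ms.length < ms.length ∧
        ms.getD (pvBisect ms (PySem.Str.lower s) 0 ms.length) "" = PySem.Str.lower s) :=
      fun hh => by have := (hcond s).mpr hh; rw [this] at h; exact absurd rfl h
    simp only [Bool.not_eq_true] at h
    simp only [h, Bool.false_eq_true, if_false, if_neg hn]
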